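-- pv_equiv track=rewrite | github.com/SeungWoo-You/POSTECH | Basic Programming/2023 Fall/assignment 2/assn2.py | is_cont
-- ===== SOURCE A (Python) =====
-- def is_cont(L: list[int], min_len: int) -> bool:
--     ls = sorted(L)
--     prev = ls[0]
--     cnt = 1
--     for i in range(1, len(ls)):
--         if prev + 1 == ls[i]:
--             cnt += 1
--         elif prev == ls[i]:
--             pass
--         else:
--             cnt = 1
--         prev = ls[i]
--     return True if cnt >= min_len else False
-- ===== SOURCE B (Python) =====
-- def is_cont(L: list[int], min_len: int) -> bool:
--     s = set(L)
--     m = max(L)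
--     cnt = 0
--     while m - cnt in s:
--         cnt += 1
--     return cnt >= min_len
-- ===== Notes on version B (the rewrite author's own statement) =====
-- stated objective: alternative
-- what changed: Instead of sorting and scanning for the run ending at the maximum, B builds a hash set, takes max(L), and counts downward while max-cnt is present; it trades the sort for set construction and lookups.
import Mathlib
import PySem

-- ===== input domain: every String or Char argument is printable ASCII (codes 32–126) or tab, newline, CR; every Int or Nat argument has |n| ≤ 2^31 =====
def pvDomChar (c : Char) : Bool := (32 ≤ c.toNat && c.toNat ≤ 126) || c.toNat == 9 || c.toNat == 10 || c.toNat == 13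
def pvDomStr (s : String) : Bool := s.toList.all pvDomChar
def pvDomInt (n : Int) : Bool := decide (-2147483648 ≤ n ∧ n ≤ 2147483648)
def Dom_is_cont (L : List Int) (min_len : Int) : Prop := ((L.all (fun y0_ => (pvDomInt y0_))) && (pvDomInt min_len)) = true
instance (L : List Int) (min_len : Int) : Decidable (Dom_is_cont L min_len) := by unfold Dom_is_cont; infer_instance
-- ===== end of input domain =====

-- B replaces A's sort-and-scan by a hash set plus a downward count from max(L); both raise on empty L, excluded by Pre_.

-- ===== PORT A =====
def pvStepA (st : Int × Int) (x : Int) : Int × Int :=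
  if st.1 + 1 = x then (x, st.2 + 1)
  else if st.1 = x then (x, st.2)
  else (x, 1)

def is_cont (L : List Int) (min_len : Int) : Bool :=
  match PySem.List.sorted L (fun x => x) false with
  | [] => false   -- ls[0] raises IndexError in Python; outside Pre_
  | p :: rest =>
      let st := rest.foldl pvStepA (p, 1)
      if st.2 ≥ min_len then true else false

-- ===== PORT B =====
-- the while loop: cnt increments while m - cnt ∈ s; fuel L.length suffices (proved below)
def pvLoopB (s : List Int) (m : Int) : Nat → Int → Int
  | 0, cnt => cnt
  | f + 1, cnt => if (m - cnt) ∈ s then pvLoopB s m f (cnt + 1) else cnt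

def is_cont_alt (L : List Int) (min_len : Int) : Bool :=
  let s := PySem.Set.ofList L
  match PySem.List.max? L (fun x => x) with
  | none => false   -- max([]) raises ValueError in Python; outside Pre_
  | some m => decide (pvLoopB s m L.length 0 ≥ min_len)

-- ===== PRECONDITION & SPEC =====
-- Pre_ excludes only the empty list, on which both A (ls[0]: IndexError) and B (max: ValueError) raise.
def Pre_is_cont (L : List Int) (min_len : Int) : Prop := L ≠ []
instance (L : List Int) (min_len : Int) : Decidable (Pre_is_cont L min_len) := by unfold Pre_is_cont; infer_instance
def pvWitness_is_cont : List Int × Int := ([3, 1, 2, 5], 3)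

def Spec_is_cont (L : List Int) (min_len : Int) (out : Bool) : Prop := out = is_cont_alt L min_len
instance (L : List Int) (min_len : Int) (out : Bool) : Decidable (Spec_is_cont L min_len out) := by unfold Spec_is_cont; infer_instance

-- ===== CLAIM (what is proved, stated in full; the proofs are below) =====
def Claim_equal_is_cont : Prop := ∀ (L : List Int) (min_len : Int), Dom_is_cont L min_len → Pre_is_cont L min_len → Spec_is_cont L min_len (is_cont L min_len)

-- ===== LEMMAS AND PROOFS =====

-- Invariant of A's fold over the sorted tail: st.1 is the max of what was processed,
-- st.2 is the length of the consecutive run ending at st.1 inside the processed prefix.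
lemma foldA_inv : ∀ (rest P : List Int) (prev cnt : Int),
    (prev :: rest).Pairwise (· ≤ ·) →
    prev ∈ P → (∀ y ∈ P, y ≤ prev) → 1 ≤ cnt →
    (∀ j : Int, 0 ≤ j → j < cnt → prev - j ∈ P) → prev - cnt ∉ P →
    (rest.foldl pvStepA (prev, cnt)).1 ∈ P ++ rest ∧
    (∀ y ∈ P ++ rest, y ≤ (rest.foldl pvStepA (prev, cnt)).1) ∧
    1 ≤ (rest.foldl pvStepA (prev, cnt)).2 ∧
    (∀ j : Int, 0 ≤ j → j < (rest.foldl pvStepA (prev, cnt)).2 →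
        (rest.foldl pvStepA (prev, cnt)).1 - j ∈ P ++ rest) ∧
    (rest.foldl pvStepA (prev, cnt)).1 - (rest.foldl pvStepA (prev, cnt)).2 ∉ P ++ rest := by
  intro rest
  induction rest with
  | nil =>
      intro P prev cnt _ h1 h2 h3 h4 h5
      simpa using ⟨h1, h2, h3, h4, h5⟩
  | cons x rest' ih =>
      intro P prev cnt hpw h1 h2 h3 h4 h5
      have hle : prev ≤ x := (List.pairwise_cons.mp hpw).1 x (by simp)
      have hpw' : (x :: rest').Pairwise (· ≤ ·) := (List.pairwise_cons.mp hpw).2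
      have happ : (P ++ [x]) ++ rest' = P ++ (x :: rest') := by simp
      simp only [List.foldl_cons]
      by_cases hc1 : prev + 1 = x
      · -- run extends
        have hstep : pvStepA (prev, cnt) x = (x, cnt + 1) := by
          simp [pvStepA, hc1]
        rw [hstep, ← happ]
        apply ih
        · exact hpw'
        · simp
        · intro y hy; rcases List.mem_append.mp hy with h | h
          · exact le_trans (h2 y h) (by omega)
          · simp at h; omega
        · omega
        · intro j hj0 hj
          by_cases hj00 : j = 0
          · simp [hj00]
          · have : x - j = prev - (j - 1) := by omega
            rw [this]
            exact List.mem_append.mpr (Or.inl (h4 (j - 1) (by omega) (by omega)))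
        · intro hmem
          rcases List.mem_append.mp hmem with h | h
          · have hx : x - (cnt + 1) = prev - cnt := by omega
            rw [hx] at h; exact h5 h
          · simp at h; omega
      · by_cases hc2 : prev = x
        · -- duplicate
          have hstep : pvStepA (prev, cnt) x = (x, cnt) := by
            simp [pvStepA, hc2]
          rw [hstep, ← happ]
          apply ih
          · exact hpw'
          · simp
          · intro y hy; rcases List.mem_append.mp hy with h | h
            · exact le_trans (h2 y h) (by omega)
            · simp at h; omega
          · exact h3
          · intro j hj0 hj
            by_cases hj00 : j = 0
            · simp [hj00]
            · have : x - j = prev - j := by omega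
              rw [this]
              exact List.mem_append.mpr (Or.inl (h4 j hj0 hj))
          · intro hmem
            rcases List.mem_append.mp hmem with h | h
            · have hx : x - cnt = prev - cnt := by omega
              rw [hx] at h; exact h5 h
            · simp at h; omega
        · -- gap: x > prev + 1
          have hgap : prev + 1 < x := by omega
          have hstep : pvStepA (prev, cnt) x = (x, 1) := by
            simp [pvStepA, hc1, hc2]
          rw [hstep, ← happ]
          apply ih
          · exact hpw'
          · simp
          · intro y hy; rcases List.mem_append.mp hy with h | h
            · exact le_trans (h2 y h) (by omega)
            · simp at h; omega
          · omega
          · intro j hj0 hj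
            have hj00 : j = 0 := by omega
            subst hj00; simp
          · intro hmem
            rcases List.mem_append.mp hmem with h | h
            · have := h2 _ h; omega
            · simp at h

-- B's fuelled while loop reaches the unique c with m-0..m-(c-1) present and m-c absent
lemma loopB_eq (s : List Int) (m c : Int)
    (P1 : ∀ j : Int, 0 ≤ j → j < c → (m - j) ∈ s) (P2 : (m - c) ∉ s) :
    ∀ (f : Nat) (k : Int), 0 ≤ k → k ≤ c → c ≤ k + (f : Int) → pvLoopB s m f k = c := by
  intro f
  induction f with
  | zero =>
      intro k _ h1 h2
      simp at h2
      have hk : k = c := by omega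
      simp [pvLoopB, hk]
  | succ f ih =>
      intro k hk0 hk1 hk2
      by_cases hkc : k = c
      · subst hkc
        simp [pvLoopB, P2]
      · have hklt : k < c := by omega
        have : (m - k) ∈ s := P1 k hk0 hklt
        simp only [pvLoopB, if_pos this]
        exact ih (k + 1) (by omega) (by omega) (by push_cast at hk2 ⊢; omega)

theorem is_cont_spec : Claim_equal_is_cont := by
  intro L min_len _ hpre
  unfold Spec_is_cont
  rcases hls : PySem.List.sorted L (fun x => x) false with _ | ⟨p, rest⟩
  · exact absurd ((PySem.List.sorted_eq_nil_iff L (fun x => x) false).mp hls) hpre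
  · have hpw : (p :: rest).Pairwise (· ≤ ·) := by
      have := PySem.List.sorted_pairwise (xs := L) (key := fun x => x)
      rwa [hls] at this
    have hbase1 : ∀ j : Int, 0 ≤ j → j < 1 → p - j ∈ ([p] : List Int) := by
      intro j h0 h1
      have hj : j = 0 := by omega
      simp [hj]
    have hbase2 : p - 1 ∉ ([p] : List Int) := by
      simp
    have hinv := foldA_inv rest [p] p 1 hpw (by simp) (by simp) (by omega) hbase1 hbase2
    set st := rest.foldl pvStepA (p, 1) with hst
    obtain ⟨hmem, hmax, hc1, hP1, hP2⟩ := hinv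
    set m := st.1
    set c := st.2
    -- membership transfers: P ++ rest = p :: rest = sorted L, and x ∈ sorted L ↔ x ∈ L ↔ x ∈ set(L)
    have hmemL : ∀ x : Int, x ∈ ([p] ++ rest : List Int) ↔ x ∈ L := by
      intro x
      have : ([p] ++ rest : List Int) = PySem.List.sorted L (fun x => x) false := by simp [hls]
      rw [this, PySem.List.mem_sorted]
    have hmemS : ∀ x : Int, x ∈ PySem.Set.ofList L ↔ x ∈ L := by
      intro x; exact PySem.Set.mem_ofList L x
    -- B's max equals A's final prev
    have hLne : L ≠ [] := hpre
    rcases hmx : PySem.List.max? L (fun x => x) with _ | m'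
    · exact absurd ((PySem.List.max?_eq_none_iff L (fun x => x)).mp hmx) hLne
    · have hm'm : m' = m := by
        have h1 : m' ≤ m := hmax m' (by rw [hmemL]; exact PySem.List.max?_mem hmx)
        have h2 : m ≤ m' := PySem.List.max?_isMax hmx m ((hmemL m).mp hmem)
        omega
      -- c ≤ L.length via the c distinct values m, m-1, …, m-c+1 all in L
      have hlen : c ≤ (L.length : Int) := by
        have hnd : ((List.range c.toNat).map (fun j : Nat => m - (j : Int))).Nodup := by
          refine List.Nodup.map ?_ List.nodup_range
          intro a b hab; simp at hab; omega
        have hsub : ((List.range c.toNat).map (fun j : Nat => m - (j : Int))) ⊆ L := by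
          intro x hx
          simp only [List.mem_map, List.mem_range] at hx
          obtain ⟨j, hj, rfl⟩ := hx
          exact (hmemL _).mp (hP1 j (by omega) (by omega))
        have := (List.subperm_of_subset hnd hsub).length_le
        simp at this
        omega
      -- evaluate B
      have hloop : pvLoopB (PySem.Set.ofList L) m L.length 0 = c := by
        apply loopB_eq
        · intro j h0 h1
          rw [hmemS]
          exact (hmemL _).mp (hP1 j h0 h1)
        · rw [hmemS]
          intro h
          exact hP2 ((hmemL _).mpr h)
        · omega
        · omega
        · omega
      simp only [is_cont, is_cont_alt, hls, hmx, hm'm, hloop, ← hst, ge_iff_le]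
      by_cases h : min_len ≤ c
      · simp only [if_pos (show min_len ≤ st.2 from h)]
        simp [h]
      · simp only [if_neg (show ¬ min_len ≤ st.2 from h)]
        simp [h]
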